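-- pv_equiv track=rewrite | github.com/khangn7/cspc217 | assignments/CPSC217S23A3Board.py | win_in_diagonal_backslash
-- ===== SOURCE A (Python) =====
-- WIN_LENGTH = 3
--
-- def row_count(board) -> int:
--     """
--     returns the amount of rows in a 2d list returned by create_board()
--     :param board: list, the 2d list representing the tictactoe board
--     :return: int, amount of rows
--     """
--     return len(board)
--
-- def column_count(board) -> int:
--     """
--     returns the amount of columns in a 2d list returned by create_board()
--     :param board: list, the 2d list representing the tictactoe board
--     :return: int, amount of columns
--     """
--     return len(board[0])
--
-- def win_in_diagonal_backslash(board, piece):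
--     """
--     returns whether given piece won due to a "backslash" diagonal
--     backslash diagonal is sequence where every piece's row and column is 1 higher than previous piece
--     function checks if any diagonal of WIN_LENGTH exists where every piece is given piece
--     :param board: list, 2d list representing board
--     :param piece: int, should be constant representing player's piece
--     :return: bool, True if given piece wins, else False
--     """
--     ro_count = row_count(board)
--     col_count = column_count(board)
--     # range(ro_count - WIN_LENGTH + 1) and range(ro_count - WIN_LENGTH + 1)
--     # is so no indexing out of range
--     # iterate all possible staring coords for diagonal
--     for start_x in range(col_count - WIN_LENGTH + 1):
--         for start_y in range(ro_count - WIN_LENGTH + 1):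
--             # check diagonal
--             in_a_row = 0
--             box_x = start_x
--             box_y = start_y
--             for i in range(WIN_LENGTH):
--                 if board[box_y][box_x] == piece:
--                     in_a_row += 1
--                 else:
--                     in_a_row = 0
--                 if in_a_row == WIN_LENGTH:
--                     return True
--                 # change to index next box
--                 box_x += 1
--                 box_y += 1
--     return False
-- ===== SOURCE B (Python) =====
-- WIN_LENGTH = 3
--
-- def win_in_diagonal_backslash(board, piece):
--     """
--     Backslash-diagonal win check by walking each full diagonal once with a
--     running count of consecutive matches, instead of re-checking a fixed
--     3-cell window from every start coordinate.
--     """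
--     rows = len(board)
--     cols = len(board[0])
--     # every backslash diagonal starts on the top row or the left column
--     starts = [(0, x) for x in range(cols)] + [(y, 0) for y in range(1, rows)]
--     for y0, x0 in starts:
--         run = 0
--         y, x = y0, x0
--         while y < rows and x < cols:
--             run = run + 1 if board[y][x] == piece else 0
--             if run == WIN_LENGTH:
--                 return True
--             y += 1
--             x += 1
--     return False
-- ===== Notes on version B (the rewrite author's own statement) =====
-- stated objective: faster
-- what changed: B enumerates each full backslash diagonal (starting on the top row or left column) and walks it once with a running count of consecutive matches, instead of A's triple-nested scan that re-checks a fixed 3-cell window from every start coordinate.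
-- outside the precondition, e.g. on win_in_diagonal_backslash([[1, 1, 1], [1]], 1): A returns False, B raises IndexError; on win_in_diagonal_backslash([[1, 1, 1], [1, 1], [1, 1, 1]], 1): A returns True, B returns True
import Mathlib
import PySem

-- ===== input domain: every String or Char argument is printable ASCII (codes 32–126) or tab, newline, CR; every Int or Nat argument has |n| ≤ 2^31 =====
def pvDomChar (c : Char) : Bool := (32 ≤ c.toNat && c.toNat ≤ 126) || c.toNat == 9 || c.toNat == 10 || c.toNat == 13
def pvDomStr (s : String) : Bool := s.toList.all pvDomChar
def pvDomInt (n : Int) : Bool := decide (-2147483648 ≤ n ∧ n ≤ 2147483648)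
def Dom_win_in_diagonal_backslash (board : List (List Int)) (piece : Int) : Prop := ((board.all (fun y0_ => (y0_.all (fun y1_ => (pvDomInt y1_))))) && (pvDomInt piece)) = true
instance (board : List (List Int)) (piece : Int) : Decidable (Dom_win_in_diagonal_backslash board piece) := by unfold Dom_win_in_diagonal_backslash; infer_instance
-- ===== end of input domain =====

-- B walks each full backslash diagonal once with a running count of consecutive
-- matches instead of A's scan of a fixed 3-cell window from every start coordinate.

-- board[y][x] (both Pythons only index in range on Pre_; the default is never read there)
def pvCell (board : List (List Int)) (y x : Int) : Int :=
  (PySem.List.pyGet? ((PySem.List.pyGet? board y).getD []) x).getD 0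

-- ===== PORT A =====
-- inner 'for i in range(WIN_LENGTH)' loop of A, with early return at in_a_row == WIN_LENGTH
def pvCheckDiag (board : List (List Int)) (piece : Int) :
    List Int → Int → Int → Int → Bool
  | [], _, _, _ => false
  | _ :: is, inARow, boxX, boxY =>
      let inARow' : Int := if pvCell board boxY boxX = piece then inARow + 1 else 0
      if inARow' = 3 then true
      else pvCheckDiag board piece is inARow' (boxX + 1) (boxY + 1)

def win_in_diagonal_backslash (board : List (List Int)) (piece : Int) : Bool :=
  let roCount : Int := board.length
  let colCount : Int := ((PySem.List.pyGet? board 0).getD []).length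
  (PySem.List.pyRange 0 (colCount - 3 + 1) 1).any fun startX =>
    (PySem.List.pyRange 0 (roCount - 3 + 1) 1).any fun startY =>
      pvCheckDiag board piece (PySem.List.pyRange 0 3 1) 0 startX startY

-- ===== PORT B =====
-- the 'while y < rows and x < cols' diagonal walk of B, with its running count
def pvWalk (board : List (List Int)) (piece rows cols : Int) (y x run : Int) : Bool :=
  if y < rows ∧ x < cols then
    let run' : Int := if pvCell board y x = piece then run + 1 else 0
    if run' = 3 then true
    else pvWalk board piece rows cols (y + 1) (x + 1) run'
  else false
termination_by (rows - y).toNat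
decreasing_by simp_wf; omega

def win_in_diagonal_backslash_alt (board : List (List Int)) (piece : Int) : Bool :=
  let rows : Int := board.length
  let cols : Int := ((PySem.List.pyGet? board 0).getD []).length
  let starts : List (Int × Int) :=
    (PySem.List.pyRange 0 cols 1).map (fun x => ((0 : Int), x))
      ++ (PySem.List.pyRange 1 rows 1).map (fun y => (y, (0 : Int)))
  starts.any fun s => pvWalk board piece rows cols s.1 s.2 0

-- ===== PRECONDITION & SPEC =====
-- Pre_ excludes the empty board (both Pythons raise IndexError on len(board[0])) and
-- boards with a row shorter than the first row: on such ragged boards indexing can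
-- raise in either program (and A can return before reaching the short row while B raises).
def Pre_win_in_diagonal_backslash (board : List (List Int)) (piece : Int) : Prop :=
  board ≠ [] ∧ ∀ row ∈ board, (board.headI).length ≤ row.length
instance (board : List (List Int)) (piece : Int) : Decidable (Pre_win_in_diagonal_backslash board piece) := by unfold Pre_win_in_diagonal_backslash; infer_instance

def pvWitness_win_in_diagonal_backslash : List (List Int) × Int :=
  ([[1, 0, 0], [0, 1, 0], [0, 0, 1]], 1)

def Spec_win_in_diagonal_backslash (board : List (List Int)) (piece : Int) (out : Bool) : Prop := out = win_in_diagonal_backslash_alt board piece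
instance (board : List (List Int)) (piece : Int) (out : Bool) : Decidable (Spec_win_in_diagonal_backslash board piece out) := by unfold Spec_win_in_diagonal_backslash; infer_instance

-- ===== CLAIM (what is proved, stated in full; the proofs are below) =====
def Claim_equal_win_in_diagonal_backslash : Prop := ∀ (board : List (List Int)) (piece : Int), Dom_win_in_diagonal_backslash board piece → Pre_win_in_diagonal_backslash board piece → Spec_win_in_diagonal_backslash board piece (win_in_diagonal_backslash board piece)

-- ===== LEMMAS AND PROOFS =====

-- a winning 3-window on the backslash diagonal through (y, x), offset k ≥ 0, inside bounds
def pvWin3 (board : List (List Int)) (piece rows cols y x k : Int) : Prop :=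
  y + k + 2 < rows ∧ x + k + 2 < cols ∧
    pvCell board (y + k) (x + k) = piece ∧
    pvCell board (y + k + 1) (x + k + 1) = piece ∧
    pvCell board (y + k + 2) (x + k + 2) = piece

lemma pvCheckDiag_iff (board : List (List Int)) (piece sx sy : Int) :
    pvCheckDiag board piece (PySem.List.pyRange 0 3 1) 0 sx sy = true ↔
      (pvCell board sy sx = piece ∧ pvCell board (sy + 1) (sx + 1) = piece ∧
        pvCell board (sy + 2) (sx + 2) = piece) := by
  have hr : PySem.List.pyRange 0 3 1 = [0, 1, 2] := by decide
  rw [hr]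
  by_cases h0 : pvCell board sy sx = piece <;>
    by_cases h1 : pvCell board (sy + 1) (sx + 1) = piece <;>
      by_cases h2 : pvCell board (sy + 2) (sx + 2) = piece <;>
        simp [pvCheckDiag, h0, h1, h2, show sy + 1 + 1 = sy + 2 from by ring,
              show sx + 1 + 1 = sx + 2 from by ring]

lemma pvWin3_shift (board : List (List Int)) (piece rows cols y x k : Int) :
    pvWin3 board piece rows cols (y + 1) (x + 1) k ↔ pvWin3 board piece rows cols y x (k + 1) := by
  unfold pvWin3
  rw [show y + 1 + k = y + (k + 1) from by ring, show x + 1 + k = x + (k + 1) from by ring]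

lemma pvWalk_iff (board : List (List Int)) (piece rows cols : Int) :
    ∀ (n : Nat) (y x run : Int), (rows - y).toNat ≤ n → 0 ≤ run → run ≤ 2 →
      (pvWalk board piece rows cols y x run = true ↔
        ((∃ k : Int, 0 ≤ k ∧ pvWin3 board piece rows cols y x k) ∨
         (run = 2 ∧ y < rows ∧ x < cols ∧ pvCell board y x = piece) ∨
         (1 ≤ run ∧ y + 1 < rows ∧ x + 1 < cols ∧
            pvCell board y x = piece ∧ pvCell board (y + 1) (x + 1) = piece))) := by
  intro n
  induction n with
  | zero =>
    intro y x run hle h0 h2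
    have hny : ¬(y < rows ∧ x < cols) := by omega
    rw [pvWalk, if_neg hny]
    simp only [Bool.false_eq_true, false_iff]
    rintro (⟨k, hk, hb1, hb2, -⟩ | ⟨-, hy, hx, -⟩ | ⟨-, hy, hx, -⟩) <;> omega
  | succ n ih =>
    intro y x run hle h0 h2
    rw [pvWalk]
    by_cases hg : y < rows ∧ x < cols
    · rw [if_pos hg]
      by_cases c0 : pvCell board y x = piece
      · simp only [if_pos c0]
        by_cases h3 : run + 1 = 3
        · simp only [if_pos h3, true_iff]
          exact Or.inr (Or.inl ⟨by omega, hg.1, hg.2, c0⟩)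
        · rw [if_neg h3, ih (y + 1) (x + 1) (run + 1) (by omega) (by omega) (by omega)]
          constructor
          · rintro (⟨k, hk, hw⟩ | ⟨hr, hy1, hx1, hc1⟩ | ⟨-, hy2, hx2, hc1, hc2⟩)
            · exact Or.inl ⟨k + 1, by omega, (pvWin3_shift board piece rows cols y x k).mp hw⟩
            · exact Or.inr (Or.inr ⟨by omega, hy1, hx1, c0, hc1⟩)
            · refine Or.inl ⟨0, le_refl 0, ?_⟩
              unfold pvWin3
              simp only [add_zero]
              exact ⟨by omega, by omega, c0, hc1,
                by rw [show y + 2 = y + 1 + 1 from by ring, show x + 2 = x + 1 + 1 from by ring]; exact hc2⟩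
          · rintro (⟨k, hk, hw⟩ | ⟨hr2, -, -, -⟩ | ⟨hr1, hy1, hx1, -, hc1⟩)
            · by_cases hk0 : k = 0
              · subst hk0
                unfold pvWin3 at hw
                simp only [add_zero] at hw
                obtain ⟨hb1, hb2, -, hw1, hw2⟩ := hw
                refine Or.inr (Or.inr ⟨by omega, by omega, by omega, hw1, ?_⟩)
                rw [show y + 1 + 1 = y + 2 from by ring, show x + 1 + 1 = x + 2 from by ring]
                exact hw2
              · refine Or.inl ⟨k - 1, by omega, (pvWin3_shift board piece rows cols y x (k - 1)).mpr ?_⟩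
                rw [show k - 1 + 1 = k from by ring]
                exact hw
            · omega
            · exact Or.inr (Or.inl ⟨by omega, hy1, hx1, hc1⟩)
      · simp only [if_neg c0]
        rw [if_neg (by omega : ¬(0 : Int) = 3),
          ih (y + 1) (x + 1) 0 (by omega) (le_refl 0) (by omega)]
        constructor
        · rintro (⟨k, hk, hw⟩ | ⟨hr, -, -, -⟩ | ⟨hr, -, -, -⟩)
          · exact Or.inl ⟨k + 1, by omega, (pvWin3_shift board piece rows cols y x k).mp hw⟩
          · omega
          · omega
        · rintro (⟨k, hk, hw⟩ | ⟨-, -, -, hc⟩ | ⟨-, -, -, hc, -⟩)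
          · by_cases hk0 : k = 0
            · subst hk0
              unfold pvWin3 at hw
              simp only [add_zero] at hw
              exact absurd hw.2.2.1 c0
            · refine Or.inl ⟨k - 1, by omega, (pvWin3_shift board piece rows cols y x (k - 1)).mpr ?_⟩
              rw [show k - 1 + 1 = k from by ring]
              exact hw
          · exact absurd hc c0
          · exact absurd hc c0
    · rw [if_neg hg]
      simp only [Bool.false_eq_true, false_iff]
      rintro (⟨k, hk, hb1, hb2, -⟩ | ⟨-, hy, hx, -⟩ | ⟨-, hy, hx, -⟩) <;> omega

lemma win_A_iff (board : List (List Int)) (piece : Int) :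
    win_in_diagonal_backslash board piece = true ↔
      (∃ sy sx : Int, 0 ≤ sy ∧ 0 ≤ sx ∧
        pvWin3 board piece (board.length : Int)
          (((PySem.List.pyGet? board 0).getD []).length : Int) sy sx 0) := by
  unfold win_in_diagonal_backslash
  simp only [List.any_eq_true, PySem.List.mem_pyRange_one, pvCheckDiag_iff]
  constructor
  · rintro ⟨sx, ⟨hx0, hx1⟩, sy, ⟨hy0, hy1⟩, hc0, hc1, hc2⟩
    refine ⟨sy, sx, hy0, hx0, ?_⟩
    unfold pvWin3
    simp only [add_zero]
    exact ⟨by omega, by omega, hc0, hc1, hc2⟩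
  · rintro ⟨sy, sx, hy0, hx0, hw⟩
    unfold pvWin3 at hw
    simp only [add_zero] at hw
    obtain ⟨hb1, hb2, hc0, hc1, hc2⟩ := hw
    exact ⟨sx, ⟨hx0, by omega⟩, sy, ⟨hy0, by omega⟩, hc0, hc1, hc2⟩

lemma pvWin3_zero (board : List (List Int)) (piece rows cols y x k : Int) :
    pvWin3 board piece rows cols y x k ↔ pvWin3 board piece rows cols (y + k) (x + k) 0 := by
  unfold pvWin3
  simp only [add_zero]

lemma win_B_iff (board : List (List Int)) (piece : Int) :
    win_in_diagonal_backslash_alt board piece = true ↔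
      (∃ sy sx : Int, 0 ≤ sy ∧ 0 ≤ sx ∧
        pvWin3 board piece (board.length : Int)
          (((PySem.List.pyGet? board 0).getD []).length : Int) sy sx 0) := by
  unfold win_in_diagonal_backslash_alt
  set rows : Int := (board.length : Int) with hrows
  set cols : Int := (((PySem.List.pyGet? board 0).getD []).length : Int) with hcols
  simp only [List.any_append, List.any_map, Bool.or_eq_true, List.any_eq_true,
    Function.comp, PySem.List.mem_pyRange_one]
  constructor
  · rintro (⟨x0, ⟨hx0, hx1⟩, hw⟩ | ⟨y0, ⟨hy0, hy1⟩, hw⟩)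
    · rw [pvWalk_iff board piece rows cols (rows - 0).toNat 0 x0 0 (le_refl _)
        (le_refl 0) (by omega)] at hw
      rcases hw with ⟨k, hk, hw⟩ | ⟨h, -⟩ | ⟨h, -⟩
      · exact ⟨0 + k, x0 + k, by omega, by omega,
          (pvWin3_zero board piece rows cols 0 x0 k).mp hw⟩
      · omega
      · omega
    · rw [pvWalk_iff board piece rows cols (rows - y0).toNat y0 0 0 (le_refl _)
        (le_refl 0) (by omega)] at hw
      rcases hw with ⟨k, hk, hw⟩ | ⟨h, -⟩ | ⟨h, -⟩
      · exact ⟨y0 + k, 0 + k, by omega, by omega,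
          (pvWin3_zero board piece rows cols y0 0 k).mp hw⟩
      · omega
      · omega
  · rintro ⟨sy, sx, hy0, hx0, hw⟩
    have hb1 : sy + 0 + 2 < rows := hw.1
    have hb2 : sx + 0 + 2 < cols := hw.2.1
    by_cases hle : sy ≤ sx
    · refine Or.inl ⟨sx - sy, ⟨by omega, by omega⟩, ?_⟩
      rw [pvWalk_iff board piece rows cols (rows - 0).toNat 0 (sx - sy) 0 (le_refl _)
        (le_refl 0) (by omega)]
      refine Or.inl ⟨sy, hy0, ?_⟩
      rw [pvWin3_zero board piece rows cols 0 (sx - sy) sy, zero_add,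
        show sx - sy + sy = sx from by ring]
      exact hw
    · refine Or.inr ⟨sy - sx, ⟨by omega, by omega⟩, ?_⟩
      rw [pvWalk_iff board piece rows cols (rows - (sy - sx)).toNat (sy - sx) 0 0 (le_refl _)
        (le_refl 0) (by omega)]
      refine Or.inl ⟨sx, hx0, ?_⟩
      rw [pvWin3_zero board piece rows cols (sy - sx) 0 sx, zero_add,
        show sy - sx + sx = sy from by ring]
      exact hw

-- ===== VERDICT (by name: the statement is the Claim_ definition above) =====
theorem win_in_diagonal_backslash_spec : Claim_equal_win_in_diagonal_backslash := by
  intro board piece _dom _pre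
  unfold Spec_win_in_diagonal_backslash
  rw [Bool.eq_iff_iff, win_A_iff, win_B_iff]
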